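-- pv_equiv track=rewrite | github.com/Arnav-kUM/phd_managemenet | api/AllotInvigilators.py | extract_course_code
-- ===== SOURCE A (Python) =====
-- def extract_course_code(course_code):
--     for i in range(0,len(course_code)):
--             if course_code[i][0].isnumeric():
--                 str = ''
--                 for j in course_code[i-1]:
--                     if j.isnumeric() :
--                         break
--                     str += j
--                 course_code[i] = str+course_code[i]
--     return course_code
-- ===== SOURCE B (Python) =====
-- def _alpha_prefix(s):
--     # characters of s before its first numeric character
--     k = next((i for i, ch in enumerate(s) if ch.isnumeric()), len(s))
--     return s[:k]
--
--
-- def extract_course_code(course_code):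
--     # single forward pass with a running prefix 'carry'; mutates in place like A
--     if not course_code:
--         return course_code
--     carry = _alpha_prefix(course_code[-1])
--     for i, token in enumerate(course_code):
--         if token[0].isnumeric():
--             course_code[i] = carry + token
--         else:
--             carry = _alpha_prefix(token)
--     return course_code
-- ===== Notes on version B (the rewrite author's own statement) =====
-- stated objective: alternative
-- what changed: Replaces A's per-element rescan of the previous token (an inner character loop with break, indexed via course_code[i-1] with -1 wraparound) with a single forward pass maintaining a running alpha-prefix 'carry', seeded from the last element and updated whenever a non-numeric-starting token is seen.
import Mathlib
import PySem

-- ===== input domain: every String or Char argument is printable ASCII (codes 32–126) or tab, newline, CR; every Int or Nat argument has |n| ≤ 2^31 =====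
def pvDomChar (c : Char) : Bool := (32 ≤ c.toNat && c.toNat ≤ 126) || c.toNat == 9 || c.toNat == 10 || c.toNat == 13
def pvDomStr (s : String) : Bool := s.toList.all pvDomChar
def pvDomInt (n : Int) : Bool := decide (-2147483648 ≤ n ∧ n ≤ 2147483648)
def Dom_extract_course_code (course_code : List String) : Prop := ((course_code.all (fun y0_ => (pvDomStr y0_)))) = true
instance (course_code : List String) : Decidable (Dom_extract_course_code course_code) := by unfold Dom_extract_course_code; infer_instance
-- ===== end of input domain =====

-- B replaces A's inner rescan of the previous token with one forward pass keeping a running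
-- alpha-prefix 'carry' (alternative decomposition, same cost). Both mutate the list in place in
-- Python; the equivalence proved here is about the returned value.


-- ===== PORT A =====
-- inner loop: str = ''; for j in course_code[i-1]: if j.isnumeric(): break; str += j
-- (j.isnumeric() ported as Chars.isdigit: exact on the printable-ASCII domain, where the
--  numeric characters are exactly '0'-'9')
def aPrefix : List Char → List Char
  | [] => []
  | j :: rest => if PySem.Chars.isdigit j then [] else j :: aPrefix rest

-- one iteration of 'for i in range(0, len(course_code))'
def aStep (cc : List String) (i : Nat) : List String :=
  match PySem.List.pyGet? cc (i : Int) with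
  | none => cc
  | some s =>
    match s.toList with
    | [] => cc          -- course_code[i][0] raises IndexError here (excluded by Pre_)
    | c :: _ =>
      if PySem.Chars.isdigit c then
        match PySem.List.pyGet? cc ((i : Int) - 1) with
        | none => cc
        | some prev => PySem.List.pySetD cc (i : Int) (String.ofList (aPrefix prev.toList ++ s.toList))
      else cc

def extract_course_code (course_code : List String) : List String :=
  (List.range course_code.length).foldl aStep course_code

-- ===== PORT B =====
-- _alpha_prefix: s[:k] for the first numeric index k (len(s) if none)
def bPrefix (s : List Char) : List Char := s.take (s.findIdx PySem.Chars.isdigit)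

-- one iteration of 'for i, token in enumerate(course_code)'
def bStep : List String × List Char → Int × String → List String × List Char
  | (cc, carry), (i, tok) =>
    match tok.toList with
    | [] => (cc, carry)          -- token[0] raises IndexError here (excluded by Pre_)
    | c :: _ =>
      if PySem.Chars.isdigit c then
        (PySem.List.pySetD cc i (String.ofList (carry ++ tok.toList)), carry)
      else
        (cc, bPrefix tok.toList)

def extract_course_code_alt (course_code : List String) : List String :=
  if course_code.isEmpty then course_code
  else
    ((PySem.List.enumerate course_code).foldl bStep
      (course_code, bPrefix (((PySem.List.pyGet? course_code (-1)).getD "").toList))).1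

-- ===== PRECONDITION & SPEC =====
-- Pre_ excludes lists containing an empty string: there A raises IndexError on course_code[i][0]
-- (and B raises the same way on token[0]).
def Pre_extract_course_code (course_code : List String) : Prop :=
  ∀ s ∈ course_code, s ≠ ""
instance (course_code : List String) : Decidable (Pre_extract_course_code course_code) := by
  unfold Pre_extract_course_code; infer_instance

def pvWitness_extract_course_code : List String := ["ME", "101", "2A", "CS50"]

def Spec_extract_course_code (course_code : List String) (out : List String) : Prop := out = extract_course_code_alt course_code
instance (course_code : List String) (out : List String) : Decidable (Spec_extract_course_code course_code out) := by unfold Spec_extract_course_code; infer_instance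

-- ===== CLAIM (what is proved, stated in full; the proofs are below) =====
def Claim_equal_extract_course_code : Prop := ∀ (course_code : List String), Dom_extract_course_code course_code → Pre_extract_course_code course_code → Spec_extract_course_code course_code (extract_course_code course_code)

-- ===== LEMMAS AND PROOFS =====

-- A's accumulate-until-break prefix equals B's slice-at-first-digit prefix
lemma aPrefix_eq_bPrefix (s : List Char) : aPrefix s = bPrefix s := by
  induction s with
  | nil => rfl
  | cons c r ih =>
    by_cases h : PySem.Chars.isdigit c = true
    · simp [aPrefix, bPrefix, h, List.findIdx_cons]
    · simp [aPrefix, bPrefix, List.findIdx_cons, h, ih]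

lemma bPrefix_eq_takeWhile (s : List Char) :
    bPrefix s = s.takeWhile (fun c => !PySem.Chars.isdigit c) := by
  induction s with
  | nil => rfl
  | cons c r ih =>
    by_cases h : PySem.Chars.isdigit c = true
    · simp [bPrefix, List.findIdx_cons, h]
    · simp only [bPrefix, List.findIdx_cons, h, cond_false, List.take_succ_cons,
        List.takeWhile_cons, Bool.not_false, if_true] at *
      simp [ih]

lemma bPrefix_nondigit {s : List Char} {c : Char} (hc : c ∈ bPrefix s) :
    PySem.Chars.isdigit c = false := by
  rw [bPrefix_eq_takeWhile] at hc
  have := List.mem_takeWhile_imp hc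
  simpa using this

lemma bPrefix_carry_append {carry rest : List Char} {c : Char}
    (hall : ∀ x ∈ carry, PySem.Chars.isdigit x = false)
    (hc : PySem.Chars.isdigit c = true) :
    bPrefix (carry ++ c :: rest) = carry := by
  induction carry with
  | nil => simp [bPrefix, List.findIdx_cons, hc]
  | cons a as ih =>
    have ha : PySem.Chars.isdigit a = false := hall a (by simp)
    have h2 : bPrefix (as ++ c :: rest) = as := ih (fun x hx => hall x (by simp [hx]))
    simp only [List.cons_append, bPrefix, List.findIdx_cons, ha] at h2 ⊢
    simp [h2]

lemma toList_ne_nil {s : String} (h : s ≠ "") : s.toList ≠ [] := by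
  intro hc
  exact h (by simpa using congrArg String.ofList hc)

-- loop invariant: processing indices i..i+k-1 on both sides from an aligned state gives the
-- same list; 'carry' is B's running prefix, which equals the prefix A would recompute from
-- course_code[i-1] (with Python's -1 wraparound at i = 0)
lemma main_inv : ∀ (k i : Nat) (orig st : List String) (carry : List Char),
    st.length = orig.length →
    i + k = orig.length →
    (∀ j, i ≤ j → st[j]? = orig[j]?) →
    (∀ s ∈ st, s ≠ "") →
    carry = bPrefix (((PySem.List.pyGet? st ((i : Int) - 1)).getD "").toList) →
    (List.range' i k).foldl aStep st =
      ((PySem.List.enumerate (orig.drop i) (i : Int)).foldl bStep (st, carry)).1 := by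
  intro k
  induction k with
  | zero =>
    intro i orig st carry hlen hik _ _ _
    have hnil : orig.drop i = [] := List.drop_eq_nil_of_le (by omega)
    simp [hnil]
  | succ k ih =>
    intro i orig st carry hlen hik hagree hne hcarry
    have hi : i < orig.length := by omega
    have hist : i < st.length := by omega
    have hdrop : orig.drop i = orig[i] :: orig.drop (i + 1) := List.drop_eq_getElem_cons hi
    have hsti : st[i]? = some orig[i] := by
      rw [hagree i (le_refl i)]; exact List.getElem?_eq_getElem hi
    have htokne : orig[i] ≠ "" := hne _ (List.mem_of_getElem? hsti)
    obtain ⟨c, cs, hsplit⟩ : ∃ c cs, (orig[i]).toList = c :: cs := by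
      cases h : (orig[i]).toList with
      | nil => exact absurd h (toList_ne_nil htokne)
      | cons c cs => exact ⟨c, cs, rfl⟩
    have hcast : ((i + 1 : Nat) : Int) - 1 = (i : Int) := by push_cast; ring
    rw [List.range'_succ, hdrop, PySem.List.enumerate_cons, List.foldl_cons, List.foldl_cons]
    have hstA : PySem.List.pyGet? st ((i : Nat) : Int) = some orig[i] := by
      rw [PySem.List.pyGet?_natCast, hsti]
    by_cases hd : PySem.Chars.isdigit c = true
    · -- numeric-starting token: A prepends the recomputed prefix of st[i-1], B prepends carry
      obtain ⟨prev, hprev⟩ : ∃ prev, PySem.List.pyGet? st ((i : Int) - 1) = some prev := by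
        cases hpg : PySem.List.pyGet? st ((i : Int) - 1) with
        | some p => exact ⟨p, rfl⟩
        | none =>
          exfalso
          have := (PySem.List.pyGet?_eq_none_iff (xs := st) (i := (i : Int) - 1)).1 hpg
          exact this (by unfold PySem.Raise.InRange; omega)
      have hcarry' : carry = bPrefix prev.toList := by rw [hcarry, hprev]; rfl
      have hcall : ∀ x ∈ carry, PySem.Chars.isdigit x = false := by
        intro x hx; rw [hcarry'] at hx; exact bPrefix_nondigit hx
      have hAstep : aStep st i = st.set i (String.ofList (carry ++ c :: cs)) := by
        unfold aStep
        rw [hstA]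
        simp only [hsplit, hd, hprev, PySem.List.pySetD_natCast,
          aPrefix_eq_bPrefix, ← hcarry', if_true]
      have hBstep : bStep (st, carry) ((i : Int), orig[i]) =
          (st.set i (String.ofList (carry ++ c :: cs)), carry) := by
        unfold bStep
        simp only [hsplit, hd, PySem.List.pySetD_natCast, if_true]
      rw [hAstep, hBstep]
      set v := String.ofList (carry ++ c :: cs) with hv
      have hvne : v ≠ "" := by
        intro h
        have h2 := congrArg String.toList h
        simp [hv] at h2
      apply ih (i + 1) orig (st.set i v) carry
      · simpa using hlen
      · omega
      · intro j hj
        rw [List.getElem?_set_ne (by omega)]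
        exact hagree j (by omega)
      · intro s hs
        rcases List.mem_or_eq_of_mem_set hs with h | h
        · exact hne s h
        · rw [h]; exact hvne
      · rw [hcast, PySem.List.pyGet?_natCast, List.getElem?_set_self (by omega)]
        simp only [Option.getD_some, hv]
        rw [show (String.ofList (carry ++ c :: cs)).toList = carry ++ c :: cs by simp]
        rw [bPrefix_carry_append hcall hd]
    · -- non-numeric-starting token: A leaves the state unchanged, B updates carry
      have hd' : PySem.Chars.isdigit c = false := by simpa using hd
      have hAstep : aStep st i = st := by
        unfold aStep
        rw [hstA]
        simp only [hsplit, hd', Bool.false_eq_true, if_false]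
      have hBstep : bStep (st, carry) ((i : Int), orig[i]) = (st, bPrefix (orig[i]).toList) := by
        unfold bStep
        simp only [hsplit, hd', Bool.false_eq_true, if_false]
      rw [hAstep, hBstep]
      apply ih (i + 1) orig st (bPrefix (orig[i]).toList)
      · exact hlen
      · omega
      · intro j hj; exact hagree j (by omega)
      · exact hne
      · rw [hcast, PySem.List.pyGet?_natCast, hsti]
        simp [hsplit]

-- ===== VERDICT (by name: the statement is the Claim_ definition above) =====
theorem extract_course_code_spec : Claim_equal_extract_course_code := by
  intro cc _ hpre
  unfold Spec_extract_course_code extract_course_code extract_course_code_alt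
  cases cc with
  | nil => simp
  | cons x xs =>
    simp only [List.isEmpty_cons, Bool.false_eq_true, if_false]
    rw [List.range_eq_range']
    have := main_inv (x :: xs).length 0 (x :: xs) (x :: xs)
      (bPrefix (((PySem.List.pyGet? (x :: xs) (-1)).getD "").toList)) rfl (by omega)
      (fun j _ => rfl) hpre (by norm_num)
    simpa using this
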